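-- pv_equiv track=rewrite | github.com/LiamBenShalom6/hangman | hangman-unit7/hangman-ex7.2.7.py | arrow
-- ===== SOURCE A (Python) =====
-- def arrow(my_char, max_length):
--     arrow_str = ""
--     for i in range(1, max_length + 1):
--         for j in range(0, i):
--             arrow_str += my_char
--         arrow_str += "\n"
--
--     for i in range(max_length + 1, 1, -1):
--         for j in range(i - 2, 0, -1):
--             arrow_str += my_char
--         arrow_str += "\n"
--
--     return arrow_str
-- ===== SOURCE B (Python) =====
-- def arrow(my_char, max_length):
--     counts = list(range(1, max_length + 1)) + list(range(max_length - 1, -1, -1))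
--     return "".join(my_char * c + "\n" for c in counts)
-- ===== Notes on version B (the rewrite author's own statement) =====
-- stated objective: simpler
-- what changed: Replaces A's two sequential nested character-appending loops by building the list of per-line lengths up-leg plus down-leg and joining my_char*c + newline in one pass.
import Mathlib
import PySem

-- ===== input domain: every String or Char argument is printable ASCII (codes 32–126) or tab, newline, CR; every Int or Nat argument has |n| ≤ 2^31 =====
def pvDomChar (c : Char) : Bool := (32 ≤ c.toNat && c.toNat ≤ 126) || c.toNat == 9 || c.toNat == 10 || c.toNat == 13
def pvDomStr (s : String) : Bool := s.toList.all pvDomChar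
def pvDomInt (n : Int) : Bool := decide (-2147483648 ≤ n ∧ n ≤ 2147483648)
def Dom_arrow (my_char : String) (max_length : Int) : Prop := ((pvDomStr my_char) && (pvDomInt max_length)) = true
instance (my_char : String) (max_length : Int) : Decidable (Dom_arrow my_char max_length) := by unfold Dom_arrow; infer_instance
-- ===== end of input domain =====

-- B builds the list of per-line lengths (up-leg ++ down-leg) and joins my_char*c + "\n" in one pass,
-- instead of A's two sequential nested character-appending loops; same return value everywhere.

-- ===== PORT A =====
-- A's strings are ported on List Char (PySem style); each 'for' is a foldl over the same pyRange.
def arrow (my_char : String) (max_length : Int) : String :=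
  let cs := my_char.toList
  -- arrow_str = ""
  -- for i in range(1, max_length + 1): for j in range(0, i): arrow_str += my_char ; arrow_str += "\n"
  let s1 := (PySem.List.pyRange 1 (max_length + 1) 1).foldl
    (fun acc i => ((PySem.List.pyRange 0 i 1).foldl (fun a _ => a ++ cs) acc) ++ ['\n']) []
  -- for i in range(max_length + 1, 1, -1): for j in range(i - 2, 0, -1): arrow_str += my_char ; arrow_str += "\n"
  let s2 := (PySem.List.pyRange (max_length + 1) 1 (-1)).foldl
    (fun acc i => ((PySem.List.pyRange (i - 2) 0 (-1)).foldl (fun a _ => a ++ cs) acc) ++ ['\n']) s1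
  String.ofList s2

-- ===== PORT B =====
def arrow_alt (my_char : String) (max_length : Int) : String :=
  let counts := PySem.List.pyRange 1 (max_length + 1) 1 ++ PySem.List.pyRange (max_length - 1) (-1) (-1)
  String.ofList (PySem.Chars.join []
    (counts.map (fun c => PySem.List.pyRepeat my_char.toList c ++ ['\n'])))

-- ===== PRECONDITION & SPEC =====
def Spec_arrow (my_char : String) (max_length : Int) (out : String) : Prop := out = arrow_alt my_char max_length
instance (my_char : String) (max_length : Int) (out : String) : Decidable (Spec_arrow my_char max_length out) := by unfold Spec_arrow; infer_instance

-- ===== CLAIM (what is proved, stated in full; the proofs are below) =====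
def Claim_equal_arrow : Prop := ∀ (my_char : String) (max_length : Int), Dom_arrow my_char max_length → Spec_arrow my_char max_length (arrow my_char max_length)

-- ===== LEMMAS AND PROOFS =====

-- flatMap of a constant is a flatten of replicates (i.e. PySem.List.pyRepeat up to length)
theorem flatMap_const {α : Type} (l : List α) (cs : List Char) :
    l.flatMap (fun _ => cs) = (List.replicate l.length cs).flatten := by
  induction l with
  | nil => rfl
  | cons x xs ih => simp [List.flatMap_cons, List.replicate_succ, ih]

-- ''.join(xss) is flatten
theorem join_nil_sep (xss : List (List Char)) : PySem.Chars.join [] xss = xss.flatten := by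
  induction xss with
  | nil => simp [PySem.Chars.join_nil]
  | cons x xs ih =>
    cases xs with
    | nil => simp [PySem.Chars.join_singleton]
    | cons y ys => rw [PySem.Chars.join_cons_cons]; simp_all

-- inner loop of A (up-leg): appends my_char i times
theorem inner_up (cs : List Char) (acc : List Char) (i : Int) :
    (PySem.List.pyRange 0 i 1).foldl (fun a _ => a ++ cs) acc = acc ++ PySem.List.pyRepeat cs i := by
  rw [PySem.List.foldl_append_eq_flatMap, flatMap_const, PySem.List.length_pyRange_one]
  simp [PySem.List.pyRepeat]

-- inner loop of A (down-leg): appends my_char (i-2) times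
theorem inner_down (cs : List Char) (acc : List Char) (i : Int) :
    (PySem.List.pyRange (i - 2) 0 (-1)).foldl (fun a _ => a ++ cs) acc = acc ++ PySem.List.pyRepeat cs (i - 2) := by
  rw [PySem.List.foldl_append_eq_flatMap, flatMap_const, PySem.List.length_pyRange_neg_one]
  simp [PySem.List.pyRepeat]

-- the down-leg index list of A, shifted by 2, is B's down-leg count list
theorem down_range (ml : Int) :
    (PySem.List.pyRange (ml + 1) 1 (-1)).map (fun i => i - 2) = PySem.List.pyRange (ml - 1) (-1) (-1) := by
  rw [PySem.List.pyRange_neg_one, PySem.List.pyRange_neg_one, List.map_map]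
  have h : (ml + 1 - 1).toNat = (ml - 1 - (-1)).toNat := by omega
  rw [h]
  apply List.map_congr_left
  intro k _
  simp only [Function.comp_apply]
  omega

-- ===== VERDICT (by name: the statement is the Claim_ definition above) =====
theorem arrow_spec : Claim_equal_arrow := by
  intro my_char max_length _
  unfold Spec_arrow arrow arrow_alt
  dsimp only
  have hf1 : (fun (acc : List Char) (i : Int) =>
      ((PySem.List.pyRange 0 i 1).foldl (fun a _ => a ++ my_char.toList) acc) ++ ['\n'])
      = fun acc i => acc ++ (PySem.List.pyRepeat my_char.toList i ++ ['\n']) := by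
    funext acc i; rw [inner_up]; simp
  have hf2 : (fun (acc : List Char) (i : Int) =>
      ((PySem.List.pyRange (i - 2) 0 (-1)).foldl (fun a _ => a ++ my_char.toList) acc) ++ ['\n'])
      = fun acc i => acc ++ (PySem.List.pyRepeat my_char.toList (i - 2) ++ ['\n']) := by
    funext acc i; rw [inner_down]; simp
  rw [hf2, hf1, PySem.List.foldl_append_eq_flatMap, PySem.List.foldl_append_eq_flatMap,
    List.nil_append, join_nil_sep, List.map_append, List.flatten_append, ← down_range, List.map_map]
  simp [List.flatMap_def, Function.comp_def]
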